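-- pv_equiv track=rewrite | github.com/pvcpc-aig/keyword-extract | kw.py | gather_proxy
-- ===== SOURCE A (Python) =====
-- def gather_proxy(L, i, radius=3):
--     """
--     Collects all of the elements around the index `i` in list `L` that
--     are within `radius` indices of itself. This does not include the
--     index `i` itself.
--
--     The elements are returned in their listed order.
--     """
--     low = i - radius
--     high = i + radius
--     result = []
--
--     j = low
--     while j <= high:
--         if j >= len(L):
--             break
--         if 0 <= j and j != i:
--             result.append(L[j])
--         j += 1
--     return result
-- ===== SOURCE B (Python) =====
-- def gather_proxy(L, i, radius=3):
--     lo = max(0, i - radius)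
--     hi = max(0, min(len(L), i + radius + 1))
--     if lo <= i < hi:
--         return L[lo:i] + L[i + 1:hi]
--     return L[lo:hi]
-- ===== Notes on version B (the rewrite author's own statement) =====
-- stated objective: simpler
-- what changed: Replaces the element-by-element while loop (bounds check and i-exclusion per index) with clamped window bounds and one or two list slices concatenated.
import Mathlib
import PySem

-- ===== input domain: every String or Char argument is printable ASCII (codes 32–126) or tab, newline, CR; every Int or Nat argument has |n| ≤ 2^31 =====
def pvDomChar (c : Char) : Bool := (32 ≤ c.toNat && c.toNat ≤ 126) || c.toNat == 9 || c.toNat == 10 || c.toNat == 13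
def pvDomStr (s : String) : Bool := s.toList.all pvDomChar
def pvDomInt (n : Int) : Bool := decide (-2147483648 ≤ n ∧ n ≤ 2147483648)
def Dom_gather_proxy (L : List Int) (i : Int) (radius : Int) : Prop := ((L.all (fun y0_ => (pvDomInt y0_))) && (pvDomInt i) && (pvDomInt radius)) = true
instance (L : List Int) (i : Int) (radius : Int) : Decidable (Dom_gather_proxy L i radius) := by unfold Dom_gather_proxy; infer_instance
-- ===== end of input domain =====

-- B replaces A's per-index while-loop scan by clamped window bounds plus two slice
-- concatenations (simpler: bound arithmetic instead of an element-by-element loop).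

-- ===== PORT A =====
-- literal transliteration of A's while loop: j runs low..high, breaks at j >= len(L),
-- appends L[j] when 0 <= j and j != i
def gatherLoop (L : List Int) (i : Int) (j : Int) (high : Int) (acc : List Int) : List Int :=
  if _h : j ≤ high then
    if (L.length : Int) ≤ j then acc
    else
      gatherLoop L i (j + 1) high
        (if 0 ≤ j ∧ j ≠ i then acc ++ [(PySem.List.pyGet? L j).getD 0] else acc)
  else acc
termination_by (high + 1 - j).toNat
decreasing_by omega

def gather_proxy (L : List Int) (i : Int) (radius : Int) : List Int :=
  gatherLoop L i (i - radius) (i + radius) []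

-- ===== PORT B =====
def gather_proxy_alt (L : List Int) (i : Int) (radius : Int) : List Int :=
  let lo := max 0 (i - radius)
  let hi := max 0 (min (L.length : Int) (i + radius + 1))
  if lo ≤ i ∧ i < hi then
    PySem.List.slice L (some lo) (some i) ++ PySem.List.slice L (some (i + 1)) (some hi)
  else
    PySem.List.slice L (some lo) (some hi)

-- ===== PRECONDITION & SPEC =====
def Spec_gather_proxy (L : List Int) (i : Int) (radius : Int) (out : List Int) : Prop := out = gather_proxy_alt L i radius
instance (L : List Int) (i : Int) (radius : Int) (out : List Int) : Decidable (Spec_gather_proxy L i radius out) := by unfold Spec_gather_proxy; infer_instance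

-- ===== CLAIM (what is proved, stated in full; the proofs are below) =====
def Claim_equal_gather_proxy : Prop := ∀ (L : List Int) (i : Int) (radius : Int), Dom_gather_proxy L i radius → Spec_gather_proxy L i radius (gather_proxy L i radius)

-- ===== LEMMAS AND PROOFS =====

-- proof-only helper: the slice (L.drop a)(take (b-a)) on Int bounds via toNat
def sl (L : List Int) (a b : Int) : List Int := (L.drop a.toNat).take (b.toNat - a.toNat)

lemma sl_nil (L : List Int) (a b : Int) (h : b.toNat ≤ a.toNat) : sl L a b = [] := by
  unfold sl
  have : b.toNat - a.toNat = 0 := by omega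
  simp [this]

lemma sl_cons (L : List Int) (a b : Int) (ha : 0 ≤ a) (hlen : a.toNat < L.length)
    (hab : a < b) : sl L a b = L[a.toNat] :: sl L (a + 1) b := by
  unfold sl
  have h1 : (a + 1).toNat = a.toNat + 1 := by omega
  have h2 : b.toNat - a.toNat = (b.toNat - (a.toNat + 1)) + 1 := by omega
  rw [List.drop_eq_getElem_cons hlen, h1, h2, List.take_succ_cons]

lemma pyGet_eq (L : List Int) (a : Int) (ha : 0 ≤ a) (hlen : a.toNat < L.length) :
    (PySem.List.pyGet? L a).getD 0 = L[a.toNat] := by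
  obtain ⟨k, rfl⟩ : ∃ k : Nat, a = (k : Int) := ⟨a.toNat, by omega⟩
  simp only [Int.toNat_natCast] at hlen ⊢
  simp [PySem.List.pyGet?_natCast, List.getElem?_eq_getElem hlen]

lemma loop_char (L : List Int) (i high : Int) :
    ∀ (n : Nat) (j : Int) (acc : List Int), 0 ≤ j → (high + 1 - j).toNat = n →
      gatherLoop L i j high acc = acc ++
        (if j ≤ i ∧ i < min (high + 1) (L.length : Int)
         then sl L j i ++ sl L (i + 1) (min (high + 1) (L.length : Int))
         else sl L j (min (high + 1) (L.length : Int))) := by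
  intro n
  induction n with
  | zero =>
    intro j acc hj hn
    have hj' : ¬ j ≤ high := by omega
    rw [gatherLoop]
    simp only [hj', dif_neg, not_false_iff]
    have hm : (min (high + 1) (L.length : Int)).toNat ≤ j.toNat := by omega
    rw [if_neg, sl_nil L j _ hm, List.append_nil]
    rintro ⟨h1, h2⟩
    omega
  | succ n ih =>
    intro j acc hj hn
    by_cases hjh : j ≤ high
    · rw [gatherLoop]
      simp only [hjh, dif_pos]
      by_cases hlen : (L.length : Int) ≤ j
      · simp only [hlen, if_pos]
        have hm : (min (high + 1) (L.length : Int)).toNat ≤ j.toNat := by omega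
        rw [if_neg, sl_nil L j _ hm, List.append_nil]
        rintro ⟨h1, h2⟩
        omega
      · simp only [hlen, if_neg, not_false_iff]
        have hlt : j.toNat < L.length := by omega
        have hrec := ih (j + 1) (if 0 ≤ j ∧ j ≠ i then acc ++ [(PySem.List.pyGet? L j).getD 0] else acc) (by omega) (by omega)
        rw [hrec]
        by_cases hji : j = i
        · subst hji
          have hcondF : ¬ (j + 1 ≤ j ∧ j < min (high + 1) (L.length : Int)) := by
            rintro ⟨h1, _⟩; omega
          have hcondT : j ≤ j ∧ j < min (high + 1) (L.length : Int) := ⟨le_refl _, by omega⟩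
          rw [if_neg (by simp), if_neg hcondF, if_pos hcondT, sl_nil L j j (le_refl _)]
          simp
        · rw [if_pos ⟨hj, hji⟩, pyGet_eq L j hj hlt]
          by_cases hcond : j ≤ i ∧ i < min (high + 1) (L.length : Int)
          · rw [if_pos hcond]
            have hji' : j < i := lt_of_le_of_ne hcond.1 hji
            rw [if_pos ⟨by omega, hcond.2⟩, sl_cons L j i hj hlt hji']
            simp
          · rw [if_neg hcond]
            have hcond' : ¬ (j + 1 ≤ i ∧ i < min (high + 1) (L.length : Int)) := by
              rintro ⟨h1, h2⟩; exact hcond ⟨by omega, h2⟩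
            rw [if_neg hcond', sl_cons L j _ hj hlt (by omega)]
            simp
    · rw [gatherLoop]
      simp only [hjh, dif_neg, not_false_iff]
      have hm : (min (high + 1) (L.length : Int)).toNat ≤ j.toNat := by omega
      rw [if_neg, sl_nil L j _ hm, List.append_nil]
      rintro ⟨h1, h2⟩
      omega

lemma loop_neg (L : List Int) (i high : Int) :
    ∀ (n : Nat) (j : Int) (acc : List Int), j ≤ 0 → (-j).toNat = n →
      gatherLoop L i j high acc = gatherLoop L i 0 high acc := by
  intro n
  induction n with
  | zero =>
    intro j acc hj hn
    have : j = 0 := by omega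
    rw [this]
  | succ n ih =>
    intro j acc hj hn
    have hjneg : j < 0 := by omega
    by_cases hjh : j ≤ high
    · rw [gatherLoop]
      simp only [hjh, dif_pos]
      have hlen : ¬ (L.length : Int) ≤ j := by
        have : (0 : Int) ≤ (L.length : Int) := by positivity
        omega
      rw [if_neg hlen, if_neg (by rintro ⟨h1, _⟩; omega)]
      exact ih (j + 1) acc (by omega) (by omega)
    · have hhigh : high < 0 := by omega
      have h2 : gatherLoop L i 0 high acc = acc := by
        rw [gatherLoop, dif_neg (show ¬ (0:Int) ≤ high by omega)]
      rw [h2, gatherLoop, dif_neg hjh]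

-- ===== VERDICT (by name: the statement is the Claim_ definition above) =====
theorem gather_proxy_spec : Claim_equal_gather_proxy := by
  intro L i radius _
  unfold Spec_gather_proxy gather_proxy gather_proxy_alt
  set lo : Int := max 0 (i - radius) with hlo
  set m : Int := min (i + radius + 1) (L.length : Int) with hm
  set hi : Int := max 0 (min (L.length : Int) (i + radius + 1)) with hhi
  have hmin : min (L.length : Int) (i + radius + 1) = m := by rw [hm, min_comm]
  have step1 : gatherLoop L i (i - radius) (i + radius) [] = gatherLoop L i lo (i + radius) [] := by
    by_cases h : 0 ≤ i - radius
    · rw [hlo, max_eq_right h]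
    · rw [hlo, max_eq_left (by omega)]
      exact loop_neg L i (i + radius) (-(i - radius)).toNat (i - radius) [] (by omega) rfl
  rw [step1, loop_char L i (i + radius) (i + radius + 1 - lo).toNat lo [] (by omega) rfl]
  simp only [List.nil_append]
  have hlo0 : 0 ≤ lo := by omega
  have hhi_m : hi.toNat = m.toNat := by omega
  by_cases hcond : lo ≤ i ∧ i < m
  · have hcond' : lo ≤ i ∧ i < hi := ⟨hcond.1, by omega⟩
    have hi_eq : hi = m := by omega
    rw [if_pos hcond, if_pos hcond']
    rw [PySem.List.slice_toNat L hlo0 (by omega : (0:Int) ≤ i),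
        PySem.List.slice_toNat L (by omega : (0:Int) ≤ i + 1) (by omega : (0:Int) ≤ hi)]
    unfold sl
    rw [hi_eq]
  · have hcond' : ¬ (lo ≤ i ∧ i < hi) := by
      rintro ⟨h1, h2⟩
      exact hcond ⟨h1, by omega⟩
    rw [if_neg hcond, if_neg hcond',
        PySem.List.slice_toNat L hlo0 (by omega : (0:Int) ≤ hi)]
    unfold sl
    rw [hhi_m]
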